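-- pv_equiv track=rewrite | github.com/itsjustsandzz/dee_tee_train | MP-SPDZ/Compiler/dt_unit_tests_util.py | GroupWiseSort_plain
-- ===== SOURCE A (Python) =====
-- def SingleGroupSort_plain (x_plain, y_plain):
--     n = len(x_plain)
--     zipped_x_y = zip (x_plain, y_plain)
--     sorted_x_y = sorted(zipped_x_y)
--     tuples = zip(*sorted_x_y)
--     sorted_x_plain, sorted_y_plain = [ list(tuple) for tuple in tuples ]
--     return sorted_x_plain, sorted_y_plain
--
-- def GroupWiseSort_plain (g_plain, x_plain, y_plain):
--     n = len(y_plain)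
--     sorted_x_plain = []
--     sorted_y_plain = []
--     start_ind = 0
--     end_ind = 1
--     for i in range(n):
--         if g_plain[i] == 1:
--             start_ind = i
--         if g_plain[i+1] == 1:
--             end_ind = i + 1
--             returned_x_plain, returned_y_plain = SingleGroupSort_plain (x_plain[start_ind:end_ind], y_plain[start_ind:end_ind])
--             sorted_x_plain += returned_x_plain
--             sorted_y_plain += returned_y_plain
--     return sorted_x_plain, sorted_y_plain
-- ===== SOURCE B (Python) =====
-- def GroupWiseSort_plain(g_plain, x_plain, y_plain):
--     n = len(y_plain)
--     # position of the last marker; every g_plain[1..n] is read (as in A)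
--     last = 0
--     for j in range(1, n + 1):
--         if g_plain[j] == 1:
--             last = j
--     # decorate each kept element with its group id (markers seen so far),
--     # then ONE global sort of the (gid, x, y) triples does all groups at once
--     gids = []
--     gid = 0
--     for i in range(last):
--         if i > 0 and g_plain[i] == 1:
--             gid += 1
--         gids.append(gid)
--     keyed = sorted(zip(gids, x_plain[:last], y_plain[:last]))
--     return [t[1] for t in keyed], [t[2] for t in keyed]
-- ===== Notes on version B (the rewrite author's own statement) =====
-- stated objective: alternative
-- what changed: A scans once keeping start/end indices, slices out each marker-delimited group and sorts every group separately before concatenating; B uses decorate-sort-undecorate: it finds the last marker, tags each kept element with its group id, performs ONE global lexicographic sort of the (gid, x, y) triples and projects the two columns.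
import Mathlib
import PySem

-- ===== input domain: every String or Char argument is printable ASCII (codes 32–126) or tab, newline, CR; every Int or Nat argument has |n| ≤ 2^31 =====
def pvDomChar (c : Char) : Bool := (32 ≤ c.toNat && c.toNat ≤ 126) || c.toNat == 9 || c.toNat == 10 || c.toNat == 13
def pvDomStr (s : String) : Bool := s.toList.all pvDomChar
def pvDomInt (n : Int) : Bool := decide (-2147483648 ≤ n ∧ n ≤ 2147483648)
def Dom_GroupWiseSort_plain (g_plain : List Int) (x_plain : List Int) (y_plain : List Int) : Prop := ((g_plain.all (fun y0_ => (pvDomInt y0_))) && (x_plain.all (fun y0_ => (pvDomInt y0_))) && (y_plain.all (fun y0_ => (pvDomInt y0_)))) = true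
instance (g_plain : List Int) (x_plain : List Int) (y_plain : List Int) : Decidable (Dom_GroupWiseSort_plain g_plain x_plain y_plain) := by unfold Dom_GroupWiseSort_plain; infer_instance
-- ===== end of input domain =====

-- B replaces A's scan-split-and-sort-each-group by decorate/sort/undecorate: it tags every
-- kept element with its group id and does ONE global lexicographic sort of the (gid, x, y)
-- triples (objective: alternative algorithm, same O(n log n) cost).

-- ===== PORT A =====
-- sorted(zip(x,y)) sorts pairs lexicographically: key = toLex on the pair (exact)
def SingleGroupSort_plain (x_plain : List Int) (y_plain : List Int) : List Int × List Int :=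
  let zipped_x_y := List.zip x_plain y_plain
  let sorted_x_y := PySem.List.sorted zipped_x_y (fun p => toLex p) false
  (sorted_x_y.map Prod.fst, sorted_x_y.map Prod.snd)

def GroupWiseSort_plain (g_plain : List Int) (x_plain : List Int) (y_plain : List Int) : List Int × List Int :=
  let n := y_plain.length
  let st := (PySem.List.pyRange 0 (n : Int) 1).foldl
    (fun (st : List Int × List Int × Int) i =>
      let start_ind := if PySem.List.pyGetD g_plain i 0 = 1 then i else st.2.2
      if PySem.List.pyGetD g_plain (i + 1) 0 = 1 then
        let r := SingleGroupSort_plain (PySem.List.slice x_plain (some start_ind) (some (i + 1)))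
                                       (PySem.List.slice y_plain (some start_ind) (some (i + 1)))
        (st.1 ++ r.1, st.2.1 ++ r.2, start_ind)
      else (st.1, st.2.1, start_ind))
    ([], [], 0)
  (st.1, st.2.1)

-- ===== PORT B =====
-- sorted(zip(gids, x[:last], y[:last])): Python's 3-tuples compare lexicographically,
-- ported as nested pairs with the lexicographic key toLex (t.1, toLex t.2) (exact);
-- zip of three lists truncates to the shortest, as nested List.zip does.
def GroupWiseSort_plain_alt (g_plain : List Int) (x_plain : List Int) (y_plain : List Int) : List Int × List Int :=
  let n := y_plain.length
  let last := (PySem.List.pyRange 1 ((n : Int) + 1) 1).foldl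
    (fun last j => if PySem.List.pyGetD g_plain j 0 = 1 then j else last) 0
  let gids := ((PySem.List.pyRange 0 last 1).foldl
    (fun (st : List Int × Int) i =>
      let gid := if 0 < i ∧ PySem.List.pyGetD g_plain i 0 = 1 then st.2 + 1 else st.2
      (st.1 ++ [gid], gid)) ([], 0)).1
  let keyed := PySem.List.sorted
    (List.zip gids (List.zip (PySem.List.slice x_plain none (some last))
                             (PySem.List.slice y_plain none (some last))))
    (fun t => toLex (t.1, toLex t.2)) false
  (keyed.map (fun t => t.2.1), keyed.map (fun t => t.2.2))

-- ===== PRECONDITION & SPEC =====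
-- Pre_ excludes exactly the inputs where Python A raises: a g_plain too short for the
-- g_plain[i+1] reads (IndexError), and inputs where some group's start index falls outside
-- x_plain, so the group's zip is empty and SingleGroupSort_plain's unpacking raises ValueError.
def Pre_GroupWiseSort_plain (g_plain : List Int) (x_plain : List Int) (y_plain : List Int) : Prop :=
  y_plain.length = 0 ∨
  (y_plain.length + 1 ≤ g_plain.length ∧
   ∀ j ∈ List.range (y_plain.length + 1),
     (j = 0 ∨ PySem.List.pyGetD g_plain (j : Int) 0 = 1) →
     (∃ k ∈ List.range (y_plain.length + 1), j < k ∧ PySem.List.pyGetD g_plain (k : Int) 0 = 1) →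
     j < x_plain.length)
instance (g_plain : List Int) (x_plain : List Int) (y_plain : List Int) : Decidable (Pre_GroupWiseSort_plain g_plain x_plain y_plain) := by unfold Pre_GroupWiseSort_plain; infer_instance

def pvWitness_GroupWiseSort_plain : List Int × List Int × List Int := ([0, 1, 0, 1], [3, 1, 2], [5, 6, 4])

def Spec_GroupWiseSort_plain (g_plain : List Int) (x_plain : List Int) (y_plain : List Int) (out : List Int × List Int) : Prop := out = GroupWiseSort_plain_alt g_plain x_plain y_plain
instance (g_plain : List Int) (x_plain : List Int) (y_plain : List Int) (out : List Int × List Int) : Decidable (Spec_GroupWiseSort_plain g_plain x_plain y_plain out) := by unfold Spec_GroupWiseSort_plain; infer_instance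

-- ===== CLAIM (what is proved, stated in full; the proofs are below) =====
def Claim_equal_GroupWiseSort_plain : Prop := ∀ (g_plain : List Int) (x_plain : List Int) (y_plain : List Int), Dom_GroupWiseSort_plain g_plain x_plain y_plain → Pre_GroupWiseSort_plain g_plain x_plain y_plain → Spec_GroupWiseSort_plain g_plain x_plain y_plain (GroupWiseSort_plain g_plain x_plain y_plain)

-- ===== LEMMAS AND PROOFS =====

-- the lexicographic key B sorts the (gid, x, y) triples by
def pvKey (t : Int × Int × Int) : Lex (Int × Lex (Int × Int)) := toLex (t.1, toLex t.2)

-- A's loop body, loop state (sorted_x, sorted_y, start_ind)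
def pvAstep (g_plain x_plain y_plain : List Int) (st : List Int × List Int × Int) (i : Int) : List Int × List Int × Int :=
  let start_ind := if PySem.List.pyGetD g_plain i 0 = 1 then i else st.2.2
  if PySem.List.pyGetD g_plain (i + 1) 0 = 1 then
    let r := SingleGroupSort_plain (PySem.List.slice x_plain (some start_ind) (some (i + 1)))
                                   (PySem.List.slice y_plain (some start_ind) (some (i + 1)))
    (st.1 ++ r.1, st.2.1 ++ r.2, start_ind)
  else (st.1, st.2.1, start_ind)

def pvAloop (g_plain x_plain y_plain : List Int) (n : Nat) : List Int × List Int × Int :=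
  (PySem.List.pyRange 0 (n : Int) 1).foldl (pvAstep g_plain x_plain y_plain) ([], [], 0)

-- the marker positions in 1..n
def pvF (g_plain : List Int) (n : Nat) : List Int :=
  (PySem.List.pyRange 1 ((n : Int) + 1) 1).filter (fun j => PySem.List.pyGetD g_plain j 0 == 1)

-- per-segment fold (A's concatenation of per-group sorts, written over the cut list)
def pvSegStep (x_plain y_plain : List Int) (o : List Int × List Int) (ab : Int × Int) : List Int × List Int :=
  let r := SingleGroupSort_plain (PySem.List.slice x_plain (some ab.1) (some ab.2))
                                 (PySem.List.slice y_plain (some ab.1) (some ab.2))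
  (o.1 ++ r.1, o.2 ++ r.2)

def pvSegFold (x_plain y_plain : List Int) (cuts : List Int) : List Int × List Int :=
  (List.zip cuts cuts.tail).foldl (pvSegStep x_plain y_plain) ([], [])

-- the running start_ind after n iterations of A's loop
def pvStart (g_plain : List Int) : Nat → Int
  | 0 => 0
  | n + 1 => if PySem.List.pyGetD g_plain (n : Int) 0 = 1 then (n : Int) else pvStart g_plain n

-- one sorted segment, tagged with its group id / the raw (unsorted) tagged segment
def pvSortSeg (x_plain y_plain : List Int) (a b : Int) : List (Int × Int) :=
  PySem.List.sorted (List.zip (PySem.List.slice x_plain (some a) (some b))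
                              (PySem.List.slice y_plain (some a) (some b))) (fun p => toLex p) false

def pvTagGo (x_plain y_plain : List Int) : List Int → Int → Int → List (Int × Int × Int)
  | [], _, _ => []
  | c :: ms, k, p => (pvSortSeg x_plain y_plain p c).map (fun q => (k, q)) ++ pvTagGo x_plain y_plain ms (k + 1) c

def pvRawGo (x_plain y_plain : List Int) : List Int → Int → Int → List (Int × Int × Int)
  | [], _, _ => []
  | c :: ms, k, p =>
      (List.zip (PySem.List.slice x_plain (some p) (some c))
                (PySem.List.slice y_plain (some p) (some c))).map (fun q => (k, q)) ++
      pvRawGo x_plain y_plain ms (k + 1) c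

-- gid of index i = number of markers at positions 1..i
def pvCnt (g_plain : List Int) (i : Int) : Int :=
  (((PySem.List.pyRange 1 (i + 1) 1).countP (fun j => PySem.List.pyGetD g_plain j 0 == 1) : Nat) : Int)

------------------------------------------------------------------------------
-- A-side: the loop equals the per-segment fold over the cut list 0 :: marks
------------------------------------------------------------------------------

theorem pvAloop_succ (g_plain x_plain y_plain : List Int) (n : Nat) :
    pvAloop g_plain x_plain y_plain (n + 1) =
      pvAstep g_plain x_plain y_plain (pvAloop g_plain x_plain y_plain n) (n : Int) := by
  have h : ((n + 1 : Nat) : Int) = (n : Int) + 1 := by push_cast; ring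
  unfold pvAloop
  rw [h, PySem.List.pyRange_one_succ_right (by omega : (0 : Int) ≤ (n : Int)), List.foldl_append]
  rfl

theorem pvF_succ (g_plain : List Int) (n : Nat) :
    pvF g_plain (n + 1) =
      pvF g_plain n ++ (if PySem.List.pyGetD g_plain ((n : Int) + 1) 0 = 1 then [(n : Int) + 1] else []) := by
  have h : ((n + 1 : Nat) : Int) + 1 = ((n : Int) + 1) + 1 := by push_cast; ring
  unfold pvF
  rw [h, PySem.List.pyRange_one_succ_right (by omega : (1 : Int) ≤ (n : Int) + 1), List.filter_append]
  by_cases hm : PySem.List.pyGetD g_plain ((n : Int) + 1) 0 = 1 <;> simp [hm]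

theorem pvF_getLastD (g_plain : List Int) (n : Nat) :
    (pvF g_plain n).getLastD 0 = pvStart g_plain (n + 1) := by
  induction n with
  | zero =>
      have h0 : pvF g_plain 0 = [] := by unfold pvF; norm_num
      rw [h0]
      by_cases hm : PySem.List.pyGetD g_plain ((0 : Nat) : Int) 0 = 1 <;> simp [pvStart]
  | succ n ih =>
      have h : ((n + 1 : Nat) : Int) = (n : Int) + 1 := by push_cast; ring
      have hP : pvStart g_plain (n + 2) =
          if PySem.List.pyGetD g_plain ((n : Int) + 1) 0 = 1 then (n : Int) + 1
          else pvStart g_plain (n + 1) := by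
        show (if PySem.List.pyGetD g_plain (((n + 1 : Nat)) : Int) 0 = 1 then (((n + 1 : Nat)) : Int)
              else pvStart g_plain (n + 1)) = _
        rw [h]
      rw [pvF_succ, hP]
      by_cases hm : PySem.List.pyGetD g_plain ((n : Int) + 1) 0 = 1
      · simp [hm]
      · simp only [hm, if_false, List.append_nil]
        exact ih

theorem pvZipTail_append (l : List Int) (a c : Int) :
    List.zip ((a :: l) ++ [c]) (l ++ [c]) = List.zip (a :: l) l ++ [(l.getLastD a, c)] := by
  induction l generalizing a with
  | nil => rfl
  | cons b l ih =>
      simp only [List.cons_append, List.zip_cons_cons] at *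
      rw [ih b]
      cases l with
      | nil => rfl
      | cons hd tl =>
          have hv : ∃ v, (hd :: tl).getLast? = some v := Option.isSome_iff_exists.mp (by simp)
          obtain ⟨v, hv⟩ := hv
          simp [hv]

theorem pvSegFold_append (x_plain y_plain : List Int) (l : List Int) (c : Int) :
    pvSegFold x_plain y_plain ((0 :: l) ++ [c]) =
      pvSegStep x_plain y_plain (pvSegFold x_plain y_plain (0 :: l)) (l.getLastD 0, c) := by
  unfold pvSegFold
  have ht : ((0 :: l) ++ [c]).tail = l ++ [c] := rfl
  rw [ht, pvZipTail_append, List.foldl_append]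
  rfl

theorem pvInv (g_plain x_plain y_plain : List Int) (n : Nat) :
    pvAloop g_plain x_plain y_plain n =
      ((pvSegFold x_plain y_plain (0 :: pvF g_plain n)).1,
       (pvSegFold x_plain y_plain (0 :: pvF g_plain n)).2,
       pvStart g_plain n) := by
  induction n with
  | zero =>
      have h0 : pvF g_plain 0 = [] := by unfold pvF; norm_num
      have h1 : PySem.List.pyRange 0 ((0 : Nat) : Int) 1 = [] := by norm_num
      simp [pvAloop, pvSegFold, pvStart, h0]
  | succ n ih =>
      rw [pvAloop_succ, ih]
      have hs : (if PySem.List.pyGetD g_plain ((n : Nat) : Int) 0 = 1 then ((n : Nat) : Int)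
                 else pvStart g_plain n) = pvStart g_plain (n + 1) := rfl
      by_cases hm : PySem.List.pyGetD g_plain ((n : Int) + 1) 0 = 1
      · have hc : (0 :: pvF g_plain (n + 1)) = (0 :: pvF g_plain n) ++ [(n : Int) + 1] := by
          rw [pvF_succ]; simp [hm]
        rw [hc, pvSegFold_append, pvF_getLastD]
        show pvAstep g_plain x_plain y_plain _ _ = _
        unfold pvAstep
        rw [hs]
        simp only [hm, if_true]
        simp [pvSegStep, SingleGroupSort_plain]
      · have hc : (0 :: pvF g_plain (n + 1)) = 0 :: pvF g_plain n := by
          rw [pvF_succ]; simp [hm]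
        rw [hc]
        show pvAstep g_plain x_plain y_plain _ _ = _
        unfold pvAstep
        rw [hs]
        simp only [hm, if_false]

-- the per-segment fold is the projection of the tagged per-segment sorts
theorem pvSegFold_eq_tag (x_plain y_plain : List Int) :
    ∀ (ms : List Int) (k p : Int) (acc : List Int × List Int),
      (List.zip (p :: ms) ms).foldl (pvSegStep x_plain y_plain) acc =
        (acc.1 ++ (pvTagGo x_plain y_plain ms k p).map (fun t => t.2.1),
         acc.2 ++ (pvTagGo x_plain y_plain ms k p).map (fun t => t.2.2)) := by
  intro ms
  induction ms with
  | nil => intro k p acc; simp [pvTagGo]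
  | cons c ms ih =>
      intro k p acc
      have hz : List.zip (p :: c :: ms) (c :: ms) = (p, c) :: List.zip (c :: ms) ms := rfl
      rw [hz, List.foldl_cons, ih (k + 1) c]
      simp [pvTagGo, pvSegStep, SingleGroupSort_plain, pvSortSeg, Function.comp,
        List.map_map, List.append_assoc]

------------------------------------------------------------------------------
-- B-side: the lets of the port, in closed form
------------------------------------------------------------------------------

-- B's `last` loop computes the running last marker = pvStart g (n+1)
theorem pvLastFold (g_plain : List Int) (n : Nat) :
    (PySem.List.pyRange 1 ((n : Int) + 1) 1).foldl
      (fun last j => if PySem.List.pyGetD g_plain j 0 = 1 then j else last) 0 =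
    pvStart g_plain (n + 1) := by
  induction n with
  | zero =>
      have h1 : PySem.List.pyRange 1 (((0 : Nat) : Int) + 1) 1 = [] :=
        PySem.List.pyRange_one_eq_nil (by norm_num)
      rw [h1]
      simp [pvStart]
  | succ n ih =>
      have h : ((n + 1 : Nat) : Int) + 1 = ((n : Int) + 1) + 1 := by push_cast; ring
      have h2 : ((n + 1 : Nat) : Int) = (n : Int) + 1 := by push_cast; ring
      have hP : pvStart g_plain (n + 2) =
          if PySem.List.pyGetD g_plain ((n : Int) + 1) 0 = 1 then (n : Int) + 1
          else pvStart g_plain (n + 1) := by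
        show (if PySem.List.pyGetD g_plain (((n + 1 : Nat)) : Int) 0 = 1 then (((n + 1 : Nat)) : Int)
              else pvStart g_plain (n + 1)) = _
        rw [h2]
      rw [h, PySem.List.pyRange_one_succ_right (by omega : (1 : Int) ≤ (n : Int) + 1),
        List.foldl_append, ih, hP]
      rfl

-- B's gid loop computes the marker-count decoration pvCnt
theorem pvGidsFold (g_plain : List Int) (b : Nat) :
    (PySem.List.pyRange 0 (b : Int) 1).foldl
      (fun (st : List Int × Int) i =>
        let gid := if 0 < i ∧ PySem.List.pyGetD g_plain i 0 = 1 then st.2 + 1 else st.2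
        (st.1 ++ [gid], gid)) ([], 0) =
      ((PySem.List.pyRange 0 (b : Int) 1).map (pvCnt g_plain), pvCnt g_plain ((b : Int) - 1)) := by
  induction b with
  | zero =>
      have h0 : PySem.List.pyRange 0 ((0 : Nat) : Int) 1 = [] := by norm_num
      have hc : pvCnt g_plain (((0 : Nat) : Int) - 1) = 0 := by
        unfold pvCnt
        rw [PySem.List.pyRange_one_eq_nil (by norm_num)]
        rfl
      rw [h0, hc]
      rfl
  | succ b ih =>
      have h : ((b + 1 : Nat) : Int) = (b : Int) + 1 := by push_cast; ring
      have hstep : pvCnt g_plain (b : Int) =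
          if 0 < (b : Int) ∧ PySem.List.pyGetD g_plain (b : Int) 0 = 1
          then pvCnt g_plain ((b : Int) - 1) + 1 else pvCnt g_plain ((b : Int) - 1) := by
        by_cases hb : 0 < (b : Int)
        · unfold pvCnt
          rw [PySem.List.pyRange_one_succ_right (by omega : (1 : Int) ≤ (b : Int)),
            List.countP_append]
          have hb1 : (b : Int) - 1 + 1 = (b : Int) := by ring
          rw [hb1, List.countP_singleton]
          by_cases hm : PySem.List.pyGetD g_plain (b : Int) 0 = 1
          · simp [hm]
            omega
          · simp
            omega
        · have hb0 : (b : Int) = 0 := by omega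
          rw [hb0]
          unfold pvCnt
          rw [PySem.List.pyRange_one_eq_nil (by norm_num), PySem.List.pyRange_one_eq_nil (by norm_num)]
          simp
      rw [h, PySem.List.pyRange_one_succ_right (by omega : (0 : Int) ≤ (b : Int)),
        List.foldl_append, ih]
      simp only [List.foldl_cons, List.foldl_nil, List.map_append, List.map_cons, List.map_nil]
      have hb1 : (b : Int) + 1 - 1 = (b : Int) := by ring
      rw [hb1, ← hstep]

------------------------------------------------------------------------------
-- generic zip facts used to split the decorated list at the last cut
------------------------------------------------------------------------------

theorem pvZipTake (x y : List Int) (m : Nat) :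
    (x.take m).zip (y.take m) = (x.zip y).take m := by
  simp [List.zip, List.take_zipWith]

theorem pvZipDrop (x y : List Int) (m : Nat) :
    (x.drop m).zip (y.drop m) = (x.zip y).drop m := by
  simp [List.zip, List.drop_zipWith]

theorem pvZipReplicate (K : Int) : ∀ (m : Nat) (l : List (Int × Int)),
    (List.replicate m K).zip l = (l.take m).map (fun q => (K, q)) := by
  intro m
  induction m with
  | zero => intro l; simp
  | succ m ih =>
      intro l
      cases l with
      | nil => simp
      | cons q l => simp [List.replicate_succ, ih]

theorem pvZipLeft : ∀ (a l : List Int) (b : List (Int × Int)),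
    b.length ≤ a.length → (a ++ l).zip b = a.zip b := by
  intro a
  induction a with
  | nil =>
      intro l b hb
      have : b = [] := List.eq_nil_of_length_eq_zero (by simpa using hb)
      simp [this]
  | cons h a ih =>
      intro l b hb
      cases b with
      | nil => simp
      | cons q b => simpa using ih l b (by simpa using hb)

------------------------------------------------------------------------------
-- facts about the marker list pvF
------------------------------------------------------------------------------

theorem pvF_sorted (g_plain : List Int) (n : Nat) : (pvF g_plain n).Pairwise (· < ·) :=
  List.Pairwise.sublist List.filter_sublist (PySem.List.pairwise_lt_pyRange_one 1 ((n : Int) + 1))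

theorem pvF_mem_bounds (g_plain : List Int) (n : Nat) :
    ∀ j ∈ pvF g_plain n, 1 ≤ j ∧ j ≤ (n : Int) := by
  intro j hj
  have := List.of_mem_filter hj
  have hmem := List.mem_of_mem_filter hj
  have := (PySem.List.mem_pyRange_one).mp hmem
  omega

theorem pvGetLastD_max : ∀ (t : List Int) (d : Int), t.Pairwise (· < ·) → (∀ j ∈ t, d ≤ j) →
    d ≤ t.getLastD d ∧ (∀ j ∈ t, j ≤ t.getLastD d) ∧ t.getLastD d ∈ d :: t := by
  intro t
  induction t with
  | nil => intro d _ _; simp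
  | cons a t ih =>
      intro d hpw hd
      have ha : ∀ j ∈ t, a ≤ j := fun j hj => le_of_lt ((List.pairwise_cons.mp hpw).1 j hj)
      obtain ⟨h1, h2, h3⟩ := ih a (List.pairwise_cons.mp hpw).2 ha
      have hda : d ≤ a := hd a (List.mem_cons_self)
      rw [List.getLastD_cons]
      refine ⟨le_trans hda h1, ?_, ?_⟩
      · intro j hj
        rcases List.mem_cons.mp hj with rfl | hj
        · exact h1
        · exact h2 j hj
      · rcases List.mem_cons.mp h3 with h | h
        · exact List.mem_cons.mpr (Or.inr (List.mem_cons.mpr (Or.inl h)))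
        · exact List.mem_cons.mpr (Or.inr (List.mem_cons.mpr (Or.inr h)))

-- on and after the last marker the gid decoration is constant = number of markers
theorem pvCnt_const (g_plain : List Int) (n : Nat) (i : Int)
    (hL : ∀ j ∈ pvF g_plain n, j ≤ i) (h0 : 0 ≤ i) (hin : i ≤ (n : Int)) :
    pvCnt g_plain i = ((pvF g_plain n).length : Int) := by
  unfold pvCnt
  have hsplit : PySem.List.pyRange 1 ((n : Int) + 1) 1 =
      PySem.List.pyRange 1 (i + 1) 1 ++ PySem.List.pyRange (i + 1) ((n : Int) + 1) 1 :=
    PySem.List.pyRange_one_append 1 (i + 1) ((n : Int) + 1) (by omega) (by omega)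
  have hF : pvF g_plain n =
      (PySem.List.pyRange 1 (i + 1) 1).filter (fun j => PySem.List.pyGetD g_plain j 0 == 1) ++
      (PySem.List.pyRange (i + 1) ((n : Int) + 1) 1).filter (fun j => PySem.List.pyGetD g_plain j 0 == 1) := by
    unfold pvF
    rw [hsplit, List.filter_append]
  have htail : (PySem.List.pyRange (i + 1) ((n : Int) + 1) 1).filter
      (fun j => PySem.List.pyGetD g_plain j 0 == 1) = [] := by
    rw [List.filter_eq_nil_iff]
    intro j hj hmk
    have hjb := (PySem.List.mem_pyRange_one).mp hj
    have hjF : j ∈ pvF g_plain n := by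
      rw [hF]
      exact List.mem_append.mpr (Or.inr (List.mem_filter.mpr ⟨hj, hmk⟩))
    have := hL j hjF
    omega
  rw [List.countP_eq_length_filter, hF, htail, List.append_nil]

------------------------------------------------------------------------------
-- the decorated list equals the raw tagged segments (the heart of the proof)
------------------------------------------------------------------------------

theorem pvRawGo_append (x_plain y_plain : List Int) :
    ∀ (ms : List Int) (k p c : Int),
      pvRawGo x_plain y_plain (ms ++ [c]) k p =
        pvRawGo x_plain y_plain ms k p ++
        (List.zip (PySem.List.slice x_plain (some (ms.getLastD p)) (some c))
                  (PySem.List.slice y_plain (some (ms.getLastD p)) (some c))).map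
          (fun q => (k + (ms.length : Int), q)) := by
  intro ms
  induction ms with
  | nil => intro k p c; simp [pvRawGo]
  | cons c' ms ih =>
      intro k p c
      simp only [List.cons_append, pvRawGo, List.getLastD_cons, List.length_cons]
      rw [ih (k + 1) c' c, List.append_assoc]
      have hk : k + ((ms.length + 1 : Nat) : Int) = k + 1 + (ms.length : Int) := by push_cast; ring
      rw [hk]

theorem pvKeyed_eq_raw (g_plain x_plain y_plain : List Int) (n : Nat) :
    List.zip ((PySem.List.pyRange 0 ((pvF g_plain n).getLastD 0) 1).map (pvCnt g_plain))
      ((x_plain.zip y_plain).take ((pvF g_plain n).getLastD 0).toNat) =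
    pvRawGo x_plain y_plain (pvF g_plain n) 0 0 := by
  induction n with
  | zero =>
      have h0 : pvF g_plain 0 = [] := by unfold pvF; norm_num
      have h1 : PySem.List.pyRange 0 (0 : Int) 1 = [] := PySem.List.pyRange_one_eq_nil (by norm_num)
      simp [h0, pvRawGo, h1]
  | succ n ih =>
      by_cases hm : PySem.List.pyGetD g_plain ((n : Int) + 1) 0 = 1
      · -- a new marker at n+1: the decorated list grows by one tagged segment
        have hc : pvF g_plain (n + 1) = pvF g_plain n ++ [(n : Int) + 1] := by
          rw [pvF_succ]; simp [hm]
        set ms := pvF g_plain n with hms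
        have hbounds := pvF_mem_bounds g_plain n
        have hmax := pvGetLastD_max ms 0 (pvF_sorted g_plain n)
          (fun j hj => by have := hbounds j hj; omega)
        set L : Int := ms.getLastD 0 with hLdef
        have h0L : 0 ≤ L := hmax.1
        have hLn : L ≤ (n : Int) := by
          rcases List.mem_cons.mp hmax.2.2 with h | h
          · omega
          · have := hbounds _ h; omega
        set P := x_plain.zip y_plain with hP
        have hLnat : (L.toNat : Int) = L := Int.toNat_of_nonneg h0L
        have hc1nat : (((n : Int) + 1).toNat) = n + 1 := by omega
        -- split the index range and the pair list at L
        have hrange : PySem.List.pyRange 0 ((n : Int) + 1) 1 =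
            PySem.List.pyRange 0 L 1 ++ PySem.List.pyRange L ((n : Int) + 1) 1 :=
          PySem.List.pyRange_one_append 0 L ((n : Int) + 1) h0L (by omega)
        have htake : P.take (n + 1) = P.take L.toNat ++ (P.drop L.toNat).take (n + 1 - L.toNat) := by
          have h' : n + 1 = L.toNat + (n + 1 - L.toNat) := by omega
          rw [h', List.take_add, Nat.add_sub_cancel_left]
        -- the new segment, as a drop/take of P
        have hseg : List.zip (PySem.List.slice x_plain (some L) (some ((n : Int) + 1)))
              (PySem.List.slice y_plain (some L) (some ((n : Int) + 1))) =
            (P.drop L.toNat).take (n + 1 - L.toNat) := by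
          rw [PySem.List.slice_toNat x_plain h0L (by omega), PySem.List.slice_toNat y_plain h0L (by omega),
            hc1nat, pvZipTake, pvZipDrop]
        -- the decoration is constant on the new segment
        have hrep : (PySem.List.pyRange L ((n : Int) + 1) 1).map (pvCnt g_plain) =
            List.replicate (n + 1 - L.toNat) ((ms.length : Int)) := by
          rw [List.eq_replicate_iff]
          constructor
          · rw [List.length_map, PySem.List.length_pyRange_one]; omega
          · intro b hb
            obtain ⟨i, hi, rfl⟩ := List.mem_map.mp hb
            have hib := (PySem.List.mem_pyRange_one).mp hi
            exact pvCnt_const g_plain n i (fun j hj => le_trans (hmax.2.1 j hj) hib.1)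
              (le_trans h0L hib.1) (by omega)
        have hlen1 : ((PySem.List.pyRange 0 L 1).map (pvCnt g_plain)).length = L.toNat := by
          rw [List.length_map, PySem.List.length_pyRange_one]; omega
        have hlast : ((ms ++ [(n : Int) + 1]).getLastD 0) = (n : Int) + 1 := by simp
        rw [hc, hlast, pvRawGo_append]
        simp only [zero_add]
        rw [← hLdef, hseg, hc1nat, hrange, List.map_append, htake]
        by_cases hPlen : L.toNat ≤ P.length
        · -- the cut lies inside the pair list: split the zip at L
          have hlen2 : (P.take L.toNat).length = L.toNat := by
            rw [List.length_take]; omega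
          rw [List.zip_append (by rw [hlen1, hlen2]), ih, hrep, pvZipReplicate,
            List.take_of_length_le (by rw [List.length_take]; omega)]
        · -- the pair list ends before the cut: everything truncates there
          rw [Nat.not_le] at hPlen
          have hdrop : P.drop L.toNat = [] := by
            rw [List.drop_eq_nil_iff]; omega
          rw [hdrop]
          simp only [List.take_nil, List.map_nil, List.append_nil]
          rw [List.take_of_length_le (le_of_lt hPlen)]
          rw [pvZipLeft _ _ _ (by rw [hlen1]; omega)]
          rw [← ih, List.take_of_length_le (le_of_lt hPlen)]
      · have hc : pvF g_plain (n + 1) = pvF g_plain n := by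
          rw [pvF_succ]; simp [hm]
        rw [hc]; exact ih

------------------------------------------------------------------------------
-- sorting the raw tagged list equals concatenating the tagged per-segment sorts
------------------------------------------------------------------------------

theorem pvTag_perm_raw (x_plain y_plain : List Int) :
    ∀ (ms : List Int) (k p : Int),
      (pvTagGo x_plain y_plain ms k p).Perm (pvRawGo x_plain y_plain ms k p) := by
  intro ms
  induction ms with
  | nil => intro k p; simp [pvTagGo, pvRawGo]
  | cons c ms ih =>
      intro k p
      exact ((PySem.List.sorted_perm _ _ _).map _).append (ih (k + 1) c)

theorem pvTag_ge (x_plain y_plain : List Int) :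
    ∀ (ms : List Int) (k p : Int) (t : Int × Int × Int),
      t ∈ pvTagGo x_plain y_plain ms k p → k ≤ t.1 := by
  intro ms
  induction ms with
  | nil => intro k p t ht; simp [pvTagGo] at ht
  | cons c ms ih =>
      intro k p t ht
      rcases List.mem_append.mp ht with h | h
      · obtain ⟨q, _, rfl⟩ := List.mem_map.mp h
        exact le_refl k
      · have := ih (k + 1) c t h
        omega

theorem pvTag_pairwise (x_plain y_plain : List Int) :
    ∀ (ms : List Int) (k p : Int),
      (pvTagGo x_plain y_plain ms k p).Pairwise (fun a b => pvKey a ≤ pvKey b) := by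
  intro ms
  induction ms with
  | nil => intro k p; simp [pvTagGo]
  | cons c ms ih =>
      intro k p
      rw [pvTagGo, List.pairwise_append]
      refine ⟨?_, ih (k + 1) c, ?_⟩
      · rw [List.pairwise_map]
        refine (PySem.List.sorted_pairwise _ _).imp ?_
        intro a b hab
        show pvKey (k, a) ≤ pvKey (k, b)
        unfold pvKey
        rw [Prod.Lex.toLex_le_toLex]
        exact Or.inr ⟨rfl, hab⟩
      · intro a ha b hb
        obtain ⟨q, _, rfl⟩ := List.mem_map.mp ha
        have hk : k + 1 ≤ b.1 := pvTag_ge x_plain y_plain ms (k + 1) c b hb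
        show pvKey (k, q) ≤ pvKey b
        unfold pvKey
        rw [Prod.Lex.toLex_le_toLex]
        exact Or.inl (by simpa using by omega)

theorem pvKey_injective : Function.Injective pvKey := by
  intro a b h
  unfold pvKey at h
  have h1 : (a.1, toLex a.2) = (b.1, toLex b.2) := congrArg ofLex h
  have h2 : a.1 = b.1 := congrArg Prod.fst h1
  have h3 : toLex a.2 = toLex b.2 := congrArg Prod.snd h1
  have h4 : a.2 = b.2 := congrArg ofLex h3
  exact Prod.ext h2 h4

theorem pvSorted_raw (x_plain y_plain : List Int) (ms : List Int) :
    PySem.List.sorted (pvRawGo x_plain y_plain ms 0 0) pvKey false =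
      pvTagGo x_plain y_plain ms 0 0 := by
  exact PySem.List.eq_of_perm_of_pairwise_le_of_injective pvKey pvKey_injective
    ((PySem.List.sorted_perm _ _ _).trans (pvTag_perm_raw x_plain y_plain ms 0 0).symm)
    (PySem.List.sorted_pairwise _ _) (pvTag_pairwise x_plain y_plain ms 0 0)

------------------------------------------------------------------------------
-- assembly
------------------------------------------------------------------------------

theorem pvA_eq_tag (g_plain x_plain y_plain : List Int) :
    GroupWiseSort_plain g_plain x_plain y_plain =
      ((pvTagGo x_plain y_plain (pvF g_plain y_plain.length) 0 0).map (fun t => t.2.1),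
       (pvTagGo x_plain y_plain (pvF g_plain y_plain.length) 0 0).map (fun t => t.2.2)) := by
  have hA : GroupWiseSort_plain g_plain x_plain y_plain =
      ((pvAloop g_plain x_plain y_plain y_plain.length).1,
       (pvAloop g_plain x_plain y_plain y_plain.length).2.1) := rfl
  rw [hA, pvInv]
  have h := pvSegFold_eq_tag x_plain y_plain (pvF g_plain y_plain.length) 0 0 ([], [])
  unfold pvSegFold
  have ht : (0 :: pvF g_plain y_plain.length).tail = pvF g_plain y_plain.length := rfl
  rw [ht, h]
  simp

theorem pvB_eq_tag (g_plain x_plain y_plain : List Int) :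
    GroupWiseSort_plain_alt g_plain x_plain y_plain =
      ((pvTagGo x_plain y_plain (pvF g_plain y_plain.length) 0 0).map (fun t => t.2.1),
       (pvTagGo x_plain y_plain (pvF g_plain y_plain.length) 0 0).map (fun t => t.2.2)) := by
  have hbounds := pvF_mem_bounds g_plain y_plain.length
  have hmax := pvGetLastD_max (pvF g_plain y_plain.length) 0 (pvF_sorted g_plain y_plain.length)
    (fun j hj => by have := hbounds j hj; omega)
  have h0L : 0 ≤ (pvF g_plain y_plain.length).getLastD 0 := hmax.1
  have hlastfold : (PySem.List.pyRange 1 ((y_plain.length : Int) + 1) 1).foldl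
      (fun last j => if PySem.List.pyGetD g_plain j 0 = 1 then j else last) 0 =
      (pvF g_plain y_plain.length).getLastD 0 := by
    rw [pvLastFold, ← pvF_getLastD]
  have hgids := pvGidsFold g_plain ((pvF g_plain y_plain.length).getLastD 0).toNat
  rw [Int.toNat_of_nonneg h0L] at hgids
  simp only [GroupWiseSort_plain_alt]
  rw [hlastfold]
  simp only [hgids]
  rw [PySem.List.slice_to x_plain h0L, PySem.List.slice_to y_plain h0L, pvZipTake]
  rw [show (fun (t : Int × Int × Int) => toLex (t.1, toLex t.2)) = pvKey from rfl]
  rw [pvKeyed_eq_raw g_plain x_plain y_plain y_plain.length, pvSorted_raw]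

-- ===== VERDICT (by name: the statement is the Claim_ definition above) =====
theorem GroupWiseSort_plain_spec : Claim_equal_GroupWiseSort_plain := by
  intro g x y _ _
  unfold Spec_GroupWiseSort_plain
  rw [pvA_eq_tag, pvB_eq_tag]
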